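-- pv_equiv track=rewrite | github.com/yakimk/lib | src/pb_robustness_measures/sampling_robustness_measure/srm.py | convolve_truncate
-- ===== SOURCE A (Python) =====
-- def convolve_truncate(a, b, maxdeg):
--     """
--     Truncated convolution of lists a and b up to degree maxdeg inclusive.
--     """
--     n = maxdeg + 1
--     c = [0] * n
--     nz_a = [i for i, v in enumerate(a) if v != 0]
--     nz_b = [j for j, v in enumerate(b) if v != 0]
--     for i in nz_a:
--         ai = a[i]
--         bj_list = nz_b
--         for j in bj_list:
--             t = i + j
--             if t > maxdeg:
--                 break
--             c[t] += ai * b[j]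
--     return c
-- ===== SOURCE B (Python) =====
-- def convolve_truncate(a, b, maxdeg):
--     """
--     Truncated convolution of lists a and b up to degree maxdeg inclusive.
--     Output-centric: each coefficient c[t] is computed directly as the
--     dot product sum(a[i] * b[t-i]), no sparse index lists and no in-place
--     accumulation.
--     """
--     la, lb = len(a), len(b)
--     out = []
--     for t in range(maxdeg + 1):
--         s = 0
--         for i in range(la):
--             if 0 <= t - i < lb:
--                 s += a[i] * b[t - i]
--         out.append(s)
--     return out
-- ===== Notes on version B (the rewrite author's own statement) =====
-- stated objective: alternative
-- what changed: A builds sparse nonzero-index lists and accumulates products into a mutable result with an early break; B computes each output coefficient t directly as the dot product sum(a[i]*b[t-i]) over the valid index window, with no sparse lists, no mutation and no break.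
import Mathlib
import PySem

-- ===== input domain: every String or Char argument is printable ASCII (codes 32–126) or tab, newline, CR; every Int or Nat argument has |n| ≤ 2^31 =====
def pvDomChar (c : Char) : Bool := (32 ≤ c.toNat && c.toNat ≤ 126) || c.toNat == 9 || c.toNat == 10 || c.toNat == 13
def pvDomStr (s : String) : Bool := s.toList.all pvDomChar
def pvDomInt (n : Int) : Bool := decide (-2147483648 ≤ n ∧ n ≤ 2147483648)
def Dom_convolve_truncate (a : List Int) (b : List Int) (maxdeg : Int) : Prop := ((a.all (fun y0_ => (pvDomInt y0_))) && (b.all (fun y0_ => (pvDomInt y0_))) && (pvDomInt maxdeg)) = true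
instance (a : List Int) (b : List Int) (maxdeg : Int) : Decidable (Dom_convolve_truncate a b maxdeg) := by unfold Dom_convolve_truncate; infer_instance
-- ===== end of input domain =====

-- B computes each truncated-convolution coefficient directly as a windowed dot
-- product instead of A's sparse-index accumulation loops (objective: alternative).

-- ===== PORT A =====
-- inner 'for j in bj_list: … break' loop of A; c[t] += ai*b[j] via pySetD/pyGetD
-- (indices i, j come from enumerate, hence are nonnegative and in range).
def pvInnerA (maxdeg : Int) (b : List Int) (ai : Int) (i : Int) :
    List Int → List Int → List Int
  | [], c => c
  | j :: js, c =>
      if i + j > maxdeg then c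
      else pvInnerA maxdeg b ai i js
        (PySem.List.pySetD c (i + j) (PySem.List.pyGetD c (i + j) 0 + ai * PySem.List.pyGetD b j 0))

def convolve_truncate (a : List Int) (b : List Int) (maxdeg : Int) : List Int :=
  let n := maxdeg + 1
  let c : List Int := List.replicate n.toNat 0   -- [0]*n, empty when n ≤ 0, as in Python
  let nz_a := ((PySem.List.enumerate a).filter (fun p => p.2 != 0)).map (·.1)
  let nz_b := ((PySem.List.enumerate b).filter (fun p => p.2 != 0)).map (·.1)
  nz_a.foldl (fun c i => pvInnerA maxdeg b (PySem.List.pyGetD a i 0) i nz_b c) c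

-- ===== PORT B =====
def convolve_truncate_alt (a : List Int) (b : List Int) (maxdeg : Int) : List Int :=
  (PySem.List.pyRange 0 (maxdeg + 1) 1).map (fun t =>
    (PySem.List.pyRange 0 (a.length : Int) 1).foldl
      (fun s i =>
        if 0 ≤ t - i ∧ t - i < (b.length : Int) then
          s + PySem.List.pyGetD a i 0 * PySem.List.pyGetD b (t - i) 0
        else s) 0)

-- ===== PRECONDITION & SPEC =====
def Spec_convolve_truncate (a : List Int) (b : List Int) (maxdeg : Int) (out : List Int) : Prop := out = convolve_truncate_alt a b maxdeg
instance (a : List Int) (b : List Int) (maxdeg : Int) (out : List Int) : Decidable (Spec_convolve_truncate a b maxdeg out) := by unfold Spec_convolve_truncate; infer_instance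

-- ===== CLAIM (what is proved, stated in full; the proofs are below) =====
def Claim_equal_convolve_truncate : Prop := ∀ (a : List Int) (b : List Int) (maxdeg : Int), Dom_convolve_truncate a b maxdeg → Spec_convolve_truncate a b maxdeg (convolve_truncate a b maxdeg)

-- ===== LEMMAS AND PROOFS =====

-- the common mathematical value of coefficient t (an Int index)
def pvCoeff (a b : List Int) (t : Int) : Int :=
  ((PySem.List.pyRange 0 (a.length : Int) 1).map (fun i =>
    if 0 ≤ t - i ∧ t - i < (b.length : Int) then
      PySem.List.pyGetD a i 0 * PySem.List.pyGetD b (t - i) 0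
    else 0)).sum

-- guarded-add foldl is a sum of guarded terms
theorem pv_foldl_guard_sum (p : Int → Prop) [DecidablePred p] (f : Int → Int)
    (l : List Int) (s : Int) :
    l.foldl (fun s x => if p x then s + f x else s) s
      = s + (l.map (fun x => if p x then f x else 0)).sum := by
  induction l generalizing s with
  | nil => simp
  | cons x l ih =>
    simp only [List.foldl_cons, List.map_cons, List.sum_cons, ih]
    split_ifs <;> ring

theorem pv_alt_get (a b : List Int) (maxdeg : Int) (k : Nat)
    (hk : k < (maxdeg + 1 - 0).toNat)
    (hk' : k < (convolve_truncate_alt a b maxdeg).length) :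
    (convolve_truncate_alt a b maxdeg)[k] = pvCoeff a b (k : Int) := by
  rw [← List.getD_eq_getElem _ 0 hk', ← PySem.List.pyGetD_natCast]
  unfold convolve_truncate_alt
  rw [PySem.List.pyGetD_map_pyRange_of_nonneg _ _ _ _ (by positivity) (by omega)]
  rw [pv_foldl_guard_sum (fun i => 0 ≤ (k : Int) - i ∧ (k : Int) - i < (b.length : Int))]
  simp [pvCoeff]

-- length facts
theorem pv_inner_length (maxdeg : Int) (b : List Int) (ai i : Int) (js c : List Int) :
    (pvInnerA maxdeg b ai i js c).length = c.length := by
  induction js generalizing c with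
  | nil => simp [pvInnerA]
  | cons j js ih =>
    simp only [pvInnerA]
    split
    · rfl
    · rw [ih]; simp [PySem.List.length_pySetD]

theorem pv_outer_length (maxdeg : Int) (a b nzb : List Int) (is : List Int) (c : List Int) :
    (is.foldl (fun c i => pvInnerA maxdeg b (PySem.List.pyGetD a i 0) i nzb c) c).length
      = c.length := by
  induction is generalizing c with
  | nil => rfl
  | cons i is ih => rw [List.foldl_cons, ih, pv_inner_length]

theorem pv_A_length (a b : List Int) (maxdeg : Int) :
    (convolve_truncate a b maxdeg).length = (maxdeg + 1).toNat := by
  unfold convolve_truncate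
  rw [pv_outer_length]
  simp

-- get/set helper over Int indices
theorem pv_getD_setD (c : List Int) (p t v : Int) (hp : 0 ≤ p) (hlt : p < (c.length : Int))
    (ht : 0 ≤ t) :
    PySem.List.pyGetD (PySem.List.pySetD c p v) t 0
      = if t = p then v else PySem.List.pyGetD c t 0 := by
  obtain ⟨n, rfl⟩ := Int.eq_ofNat_of_zero_le hp
  obtain ⟨m, rfl⟩ := Int.eq_ofNat_of_zero_le ht
  rw [PySem.List.pyGetD_pySetD_natCast c n m v 0 (by exact_mod_cast hlt)]
  simp

-- inner loop with break = foldl over takeWhile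
theorem pv_inner_takeWhile (maxdeg : Int) (b : List Int) (ai i : Int) (js c : List Int) :
    pvInnerA maxdeg b ai i js c
      = (js.takeWhile (fun j => decide (i + j ≤ maxdeg))).foldl
          (fun c j => PySem.List.pySetD c (i + j)
            (PySem.List.pyGetD c (i + j) 0 + ai * PySem.List.pyGetD b j 0)) c := by
  induction js generalizing c with
  | nil => simp [pvInnerA]
  | cons j js ih =>
    simp only [pvInnerA]
    rw [List.takeWhile_cons]
    by_cases h : i + j ≤ maxdeg
    · rw [if_neg (by omega : ¬ i + j > maxdeg),
        if_pos (show (decide (i + j ≤ maxdeg)) = true by simpa using h), List.foldl_cons, ih]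
    · rw [if_pos (by omega : i + j > maxdeg),
        if_neg (show ¬ (decide (i + j ≤ maxdeg)) = true by simpa using h)]
      rfl

-- elementwise effect of a foldl of in-range updates
theorem pv_foldl_upd_getD (F : Int → Int) (i : Int) (js : List Int) (c : List Int) (t : Int)
    (hjs : ∀ j ∈ js, 0 ≤ i + j ∧ i + j < (c.length : Int)) (ht : 0 ≤ t) :
    PySem.List.pyGetD (js.foldl (fun c j => PySem.List.pySetD c (i + j)
        (PySem.List.pyGetD c (i + j) 0 + F j)) c) t 0
      = PySem.List.pyGetD c t 0
        + ((js.filter (fun j => decide (i + j = t))).map F).sum := by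
  induction js generalizing c with
  | nil => simp
  | cons j js ih =>
    have hj := hjs j (List.mem_cons_self ..)
    rw [List.foldl_cons, ih _ (by
      intro j' hj'
      have := hjs j' (List.mem_cons_of_mem _ hj')
      simpa [PySem.List.length_pySetD] using this) ]
    rw [pv_getD_setD c (i + j) t _ hj.1 hj.2 ht]
    rw [List.filter_cons]
    by_cases h : i + j = t
    · rw [if_pos h.symm, if_pos (show (decide (i + j = t)) = true by simpa using h)]
      subst h
      simp only [List.map_cons, List.sum_cons]
      ring
    · rw [if_neg (fun hh => h hh.symm),
        if_neg (show ¬ (decide (i + j = t)) = true by simpa using h)]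

-- sorted + antitone predicate: everything dropped by takeWhile fails it
theorem pv_dropWhile_false (p : Int → Bool) (js : List Int)
    (hs : js.Pairwise (· ≤ ·))
    (hmono : ∀ x y : Int, x ≤ y → p y = true → p x = true) :
    ∀ x ∈ js.dropWhile p, p x = false := by
  induction js with
  | nil => simp
  | cons j js ih =>
    intro x hx
    rw [List.dropWhile_cons] at hx
    by_cases hj : p j = true
    · rw [if_pos hj] at hx
      exact ih hs.of_cons x hx
    · rw [if_neg hj] at hx
      rcases List.mem_cons.mp hx with rfl | hx
      · exact Bool.eq_false_iff.mpr hj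
      · cases hpx : p x
        · rfl
        · exact absurd (hmono j x ((List.pairwise_cons.mp hs).1 x hx) hpx) hj

-- filtered list over takeWhile = over the whole sorted list when the filter implies the guard
theorem pv_takeWhile_filter (js : List Int) (i t maxdeg : Int)
    (hs : js.Pairwise (· ≤ ·)) (htm : t ≤ maxdeg) :
    (js.takeWhile (fun j => decide (i + j ≤ maxdeg))).filter (fun j => decide (i + j = t))
      = js.filter (fun j => decide (i + j = t)) := by
  conv_rhs => rw [← List.takeWhile_append_dropWhile (p := fun j => decide (i + j ≤ maxdeg)) (l := js)]
  rw [List.filter_append]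
  have hdrop : (js.dropWhile (fun j => decide (i + j ≤ maxdeg))).filter
      (fun j => decide (i + j = t)) = [] := by
    rw [List.filter_eq_nil_iff]
    intro x hx
    have := pv_dropWhile_false (fun j => decide (i + j ≤ maxdeg)) js hs
      (by intro x y hxy hy; simp at hy ⊢; omega) x hx
    simp at this ⊢
    omega
  rw [hdrop, List.append_nil]

-- sum over a filtered list = sum of guarded terms over the whole list
theorem pv_sum_filter {α : Type} (q : α → Bool) (f : α → Int) (l : List α) :
    ((l.filter q).map f).sum = (l.map (fun x => if q x then f x else 0)).sum := by
  induction l with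
  | nil => rfl
  | cons x l ih =>
    rw [List.filter_cons]
    by_cases h : q x = true
    · simp [h, ih]
    · simp [h, ih]

-- collapsing the inner range sum: only j = t - i survives
theorem pv_range_pick (i t : Int) (m : Nat) (v : Int → Int) :
    ((PySem.List.pyRange 0 (m : Int) 1).map (fun j => if i + j = t then v j else 0)).sum
      = if 0 ≤ t - i ∧ t - i < (m : Int) then v (t - i) else 0 := by
  induction m with
  | zero => simp [PySem.List.pyRange_one_eq_nil]
  | succ m ih =>
    rw [show ((m + 1 : Nat) : Int) = (m : Int) + 1 by push_cast; ring]
    rw [PySem.List.pyRange_one_succ_right (by positivity)]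
    rw [List.map_append, List.sum_append, ih]
    simp only [List.map_cons, List.map_nil, List.sum_cons, List.sum_nil]
    by_cases h : i + (m : Int) = t
    · rw [if_pos h, if_neg (by omega), if_pos (by omega)]
      simp [show t - i = (m : Int) by omega]
    · rw [if_neg h]
      by_cases h2 : 0 ≤ t - i ∧ t - i < (m : Int)
      · rw [if_pos h2, if_pos (by omega)]; ring
      · rw [if_neg h2, if_neg (by omega)]; ring

-- elementwise value of the whole outer loop of A
theorem pv_outer_getD (maxdeg : Int) (a b nzb : List Int) (is : List Int) (c : List Int)
    (hc : c.length = (maxdeg + 1).toNat)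
    (hia : ∀ i ∈ is, 0 ≤ i) (hjb : ∀ j ∈ nzb, 0 ≤ j) (t : Int) (ht : 0 ≤ t) :
    PySem.List.pyGetD
        (is.foldl (fun c i => pvInnerA maxdeg b (PySem.List.pyGetD a i 0) i nzb c) c) t 0
      = PySem.List.pyGetD c t 0
        + (is.map (fun i =>
            (((nzb.takeWhile (fun j => decide (i + j ≤ maxdeg))).filter
                (fun j => decide (i + j = t))).map
              (fun j => PySem.List.pyGetD a i 0 * PySem.List.pyGetD b j 0)).sum)).sum := by
  induction is generalizing c with
  | nil => simp
  | cons i is ih =>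
    have hi := hia i (List.mem_cons_self ..)
    rw [List.foldl_cons,
      ih _ (by rw [pv_inner_length]; exact hc) (fun i h => hia i (List.mem_cons_of_mem _ h))]
    rw [pv_inner_takeWhile,
      pv_foldl_upd_getD (fun j => PySem.List.pyGetD a i 0 * PySem.List.pyGetD b j 0) i _ c t
        (by
          intro j hjw
          have hjn := hjb j ((List.takeWhile_sublist _).subset hjw)
          have hjle : decide (i + j ≤ maxdeg) = true :=
            List.mem_takeWhile_imp (p := fun j => decide (i + j ≤ maxdeg)) hjw
          simp at hjle
          constructor
          · omega
          · rw [hc]; omega) ht]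
    simp only [List.map_cons, List.sum_cons]
    ring

theorem pv_A_get (a b : List Int) (maxdeg : Int) (t : Int) (ht : 0 ≤ t) (htm : t ≤ maxdeg) :
    PySem.List.pyGetD (convolve_truncate a b maxdeg) t 0 = pvCoeff a b t := by
  unfold convolve_truncate
  -- positivity and sortedness of the nonzero-index lists
  have hnzb_sorted : (((PySem.List.enumerate b).filter (fun p => p.2 != 0)).map (·.1)).Pairwise
      ((· ≤ ·) : Int → Int → Prop) := by
    rw [List.pairwise_map]
    exact ((PySem.List.pairwise_lt_enumerate b 0).filter _).imp (fun h => le_of_lt h)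
  have hpos : ∀ (x : List Int) (i : Int),
      i ∈ ((PySem.List.enumerate x).filter (fun p => p.2 != 0)).map (·.1) → 0 ≤ i := by
    intro x i hi
    simp only [List.mem_map, List.mem_filter] at hi
    obtain ⟨⟨j, v⟩, ⟨hmem, _⟩, rfl⟩ := hi
    rw [PySem.List.mem_enumerate_iff] at hmem
    obtain ⟨k, hk, hp⟩ := hmem
    simp at hp
    omega
  rw [pv_outer_getD maxdeg a b _ _ _ (by simp) (hpos a) (hpos b) t ht]
  have hzero : PySem.List.pyGetD (List.replicate (maxdeg + 1).toNat (0 : Int)) t 0 = 0 := by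
    obtain ⟨m, rfl⟩ := Int.eq_ofNat_of_zero_le ht
    rw [PySem.List.pyGetD_natCast]
    simp [List.getD]
  rw [hzero, zero_add]
  -- per-i: drop the takeWhile, then extend the nonzero j-sum to the full range
  have hstep : ∀ i : Int,
      ((((((PySem.List.enumerate b).filter (fun p => p.2 != 0)).map (·.1)).takeWhile
          (fun j => decide (i + j ≤ maxdeg))).filter (fun j => decide (i + j = t))).map
        (fun j => PySem.List.pyGetD a i 0 * PySem.List.pyGetD b j 0)).sum
      = if 0 ≤ t - i ∧ t - i < (b.length : Int) then
          PySem.List.pyGetD a i 0 * PySem.List.pyGetD b (t - i) 0 else 0 := by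
    intro i
    rw [pv_takeWhile_filter _ i t maxdeg hnzb_sorted htm]
    rw [pv_sum_filter, List.map_map, pv_sum_filter,
      PySem.List.enumerate_eq_map_pyRange b 0, List.map_map]
    refine Eq.trans (congrArg List.sum (List.map_congr_left (fun j _ => ?_)))
      (pv_range_pick i t b.length (fun j => PySem.List.pyGetD a i 0 * PySem.List.pyGetD b j 0))
    by_cases hv : PySem.List.pyGetD b j 0 = 0 <;> simp [hv]
  rw [List.map_congr_left (fun i _ => hstep i)]
  -- extend the nonzero i-sum to the full range
  rw [List.map_map, pv_sum_filter, PySem.List.enumerate_eq_map_pyRange a 0, List.map_map]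
  unfold pvCoeff
  refine congrArg List.sum (List.map_congr_left (fun i _ => ?_))
  by_cases hv : PySem.List.pyGetD a i 0 = 0 <;> simp [hv]

-- ===== VERDICT (by name: the statement is the Claim_ definition above) =====
theorem convolve_truncate_spec : Claim_equal_convolve_truncate := by
  intro a b maxdeg _
  unfold Spec_convolve_truncate
  apply List.ext_getElem
  · rw [pv_A_length]
    simp [convolve_truncate_alt, PySem.List.length_pyRange_one]
  · intro k h1 h2
    have hk : k < (maxdeg + 1 - 0).toNat := by
      rw [pv_A_length] at h1; omega
    rw [pv_alt_get a b maxdeg k hk h2]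
    have ht : (0 : Int) ≤ (k : Int) := by positivity
    have htm : (k : Int) ≤ maxdeg := by omega
    rw [← pv_A_get a b maxdeg (k : Int) ht htm]
    rw [PySem.List.pyGetD_natCast]
    exact (List.getD_eq_getElem _ _ h1).symm
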